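-- pv_equiv track=rewrite | github.com/mjzac/advent-of-code | 2019/4.py | check
-- ===== SOURCE A (Python) =====
-- def check(num_str, part="a"):
--     is_monotonic = True
--     has_double = False
--     prev_digit = "-1"
--     occurences = 1
--     has_exact_pair = False
--     for digit in num_str:
--         if digit < prev_digit:
--             is_monotonic = False
--             break
--         if digit == prev_digit:
--             has_double = True
--             occurences += 1
--         else:
--             if occurences == 2:
--                 has_exact_pair = True
--             occurences = 1
--         prev_digit = digit
--     if occurences == 2:
--         has_exact_pair = True
--     return is_monotonic and (has_double if part is "a" else has_exact_pair)
-- ===== SOURCE B (Python) =====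
-- def check(num_str, part="a"):
--     monotonic = all(a <= b for a, b in zip(num_str, num_str[1:]))
--     counts = {}
--     for ch in num_str:
--         counts[ch] = counts.get(ch, 0) + 1
--     if part == "a":
--         pair = any(v >= 2 for v in counts.values())
--     else:
--         pair = any(v == 2 for v in counts.values())
--     return monotonic and pair
-- ===== Notes on version B (the rewrite author's own statement) =====
-- stated objective: alternative
-- what changed: Replaced the running prev-digit/occurrence-counter state machine by a pairwise zip monotonicity test plus a one-pass character-count dict whose values are scanned for a multiplicity >= 2 (part 'a') or == 2 (runs equal multiplicities once the string is monotonic).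
-- intended difference: On monotonic strings whose first character is '-' or earlier in ASCII and that contain the required double (part 'a') or exact pair (otherwise), A's two-character string sentinel prev_digit='-1' compares above the first character so A returns False; B returns True, the verdict the rule intends. — e.g. on check("--", "a"): A returns false, B returns true
import Mathlib
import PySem

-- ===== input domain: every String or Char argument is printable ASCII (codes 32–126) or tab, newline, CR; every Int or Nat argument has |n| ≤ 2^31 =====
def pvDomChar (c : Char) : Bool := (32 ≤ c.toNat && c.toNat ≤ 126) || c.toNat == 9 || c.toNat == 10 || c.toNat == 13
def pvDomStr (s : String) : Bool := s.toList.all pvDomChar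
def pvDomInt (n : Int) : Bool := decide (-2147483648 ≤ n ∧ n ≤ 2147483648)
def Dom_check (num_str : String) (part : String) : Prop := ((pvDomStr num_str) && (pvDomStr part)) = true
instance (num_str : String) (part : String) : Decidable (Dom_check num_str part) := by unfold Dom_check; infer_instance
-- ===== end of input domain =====

-- B replaces A's prev-digit/occurrence-counter state machine by a pairwise monotonicity test
-- plus character-multiplicity scans (simpler decomposition, not faster).


set_option maxRecDepth 4000

-- ===== PORT A =====
-- Python's '<' on strings, lexicographic by code point (exact); used for `digit < prev_digit`
def pyStrLt : List Char → List Char → Bool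
  | [], [] => false
  | [], _ :: _ => true
  | _ :: _, [] => false
  | a :: as, b :: bs => if a < b then true else if b < a then false else pyStrLt as bs

-- the for-loop of A; state = (is_monotonic via early stop, has_double, prev_digit, occurrences, has_exact_pair)
def checkLoop : List Char → Bool → List Char → Int → Bool → (Bool × Bool × Int × Bool)
  | [], has_double, _prev, occ, hep => (true, has_double, occ, hep)
  | d :: rest, has_double, prev, occ, hep =>
    if pyStrLt [d] prev then (false, has_double, occ, hep)   -- is_monotonic = False; break
    else if [d] = prev then checkLoop rest true [d] (occ + 1) hep
    else checkLoop rest has_double [d] 1 (if occ = 2 then true else hep)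

-- `part is "a"` ported as equality: in CPython every 1-char ASCII string is interned, so on this
-- domain identity to the literal "a" coincides with equality to "a".
def check (num_str : String) (part : String) : Bool :=
  let r := checkLoop num_str.toList false ['-', '1'] 1 false
  let is_monotonic := r.1
  let has_double := r.2.1
  let occ := r.2.2.1
  let hep0 := r.2.2.2
  let has_exact_pair := if occ = 2 then true else hep0
  is_monotonic && (if part = "a" then has_double else has_exact_pair)

-- ===== PORT B =====
-- zip(num_str, num_str[1:]) → l.zip l.tail (s[1:] is the tail); the dict counter loop
-- `counts[ch] = counts.get(ch, 0) + 1` → PySem.Dict insert/getD fold; .values() → Dict.values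
def check_alt (num_str : String) (part : String) : Bool :=
  let l := num_str.toList
  let monotonic := (l.zip l.tail).all (fun p => p.1 ≤ p.2)
  let counts : PySem.Dict Char Int :=
    l.foldl (fun d ch => d.insert ch (d.getD ch 0 + 1)) PySem.Dict.empty
  let pair := if part = "a" then counts.values.any (fun v => 2 ≤ v)
              else counts.values.any (fun v => v = 2)
  monotonic && pair

-- ===== PRECONDITION & SPEC =====
-- On monotonic strings whose first character is '-' or earlier in ASCII and that contain the
-- required double (part "a") or exact pair (otherwise), A's two-character sentinel prev_digit="-1"
-- compares above the first character, so A returns False; B returns True, the intended verdict.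
def D_check (num_str : String) (part : String) : Prop :=
  num_str.toList ≠ [] ∧ num_str.toList.headI ≤ '-' ∧
  List.IsChain (· ≤ ·) num_str.toList ∧
  (if part = "a" then ∃ x ∈ num_str.toList, 2 ≤ num_str.toList.count x
   else ∃ x ∈ num_str.toList, num_str.toList.count x = 2)

instance (num_str : String) (part : String) : Decidable (D_check num_str part) := by
  unfold D_check; infer_instance

def Spec_check (num_str : String) (part : String) (out : Bool) : Prop :=
  ¬ D_check num_str part → out = check_alt num_str part
instance (num_str : String) (part : String) (out : Bool) : Decidable (Spec_check num_str part out) := by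
  unfold Spec_check; infer_instance

def pvDiffWitness_check : String × String := ("--", "a")
def pvDiffWitnessOut_check : Bool × Bool := (false, true)

-- ===== CLAIM (what is proved, stated in full; the proofs are below) =====
def Claim_unchanged_check : Prop := ∀ (num_str : String) (part : String), Dom_check num_str part → Spec_check num_str part (check num_str part)
def Claim_changed_check : Prop := Dom_check (pvDiffWitness_check.1) (pvDiffWitness_check.2) ∧ D_check (pvDiffWitness_check.1) (pvDiffWitness_check.2) ∧ check (pvDiffWitness_check.1) (pvDiffWitness_check.2) = pvDiffWitnessOut_check.1 ∧ check_alt (pvDiffWitness_check.1) (pvDiffWitness_check.2) = pvDiffWitnessOut_check.2 ∧ pvDiffWitnessOut_check.1 ≠ pvDiffWitnessOut_check.2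
def Claim_exact_check : Prop := ∀ (num_str : String) (part : String), Dom_check num_str part → D_check num_str part → check num_str part ≠ check_alt num_str part

-- ===== LEMMAS AND PROOFS =====

lemma pyStrLt_single (d p : Char) : pyStrLt [d] [p] = decide (d < p) := by
  by_cases h1 : d < p <;> by_cases h2 : p < d <;> simp [pyStrLt, h1, h2]

lemma pyStrLt_sentinel (c : Char) : pyStrLt [c] ['-', '1'] = decide (c ≤ '-') := by
  by_cases h1 : c < '-'
  · simp [pyStrLt, h1, le_of_lt h1]
  · by_cases h2 : '-' < c
    · simp [pyStrLt, h1, h2, not_le.mpr h2]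
    · have : c = '-' := le_antisymm (le_of_not_gt h2) (le_of_not_gt h1)
      subst this
      simp [pyStrLt]

-- B's monotonicity scan is the chain predicate
lemma zipAll_eq_isChain (l : List Char) :
    ((l.zip l.tail).all (fun p => p.1 ≤ p.2)) = decide (List.IsChain (· ≤ ·) l) := by
  induction l with
  | nil => simp
  | cons a l ih =>
    cases l with
    | nil => simp
    | cons b t =>
      simp only [List.tail_cons] at ih
      simp only [List.tail_cons, List.zip_cons_cons, List.all_cons, List.isChain_cons_cons,
        Bool.decide_and, ih]

-- B's pair scans over the counter dict's values are existential multiplicity statements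
lemma values_any_ge (l : List Char) :
    (((l.foldl (fun d ch => d.insert ch (d.getD ch 0 + 1))
        (PySem.Dict.empty : PySem.Dict Char Int)).values).any (fun v => decide (2 ≤ v)))
      = decide (∃ x ∈ l, 2 ≤ l.count x) := by
  rw [PySem.Dict.foldl_insert_getD_add_one_eq_counter,
    PySem.Dict.values_eq_map_keys _ (PySem.Dict.nodup_keys_counter l) 0,
    PySem.Dict.keys_counter, List.any_map]
  simp only [Function.comp_def, PySem.Dict.getD_counter]
  rw [Bool.eq_iff_iff]
  simp only [List.any_eq_true, PySem.Set.mem_ofList, decide_eq_true_eq]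
  constructor
  · rintro ⟨x, hx, h⟩; exact ⟨x, hx, by exact_mod_cast h⟩
  · rintro ⟨x, hx, h⟩; exact ⟨x, hx, by exact_mod_cast h⟩

lemma values_any_eq (l : List Char) :
    (((l.foldl (fun d ch => d.insert ch (d.getD ch 0 + 1))
        (PySem.Dict.empty : PySem.Dict Char Int)).values).any (fun v => decide (v = 2)))
      = decide (∃ x ∈ l, l.count x = 2) := by
  rw [PySem.Dict.foldl_insert_getD_add_one_eq_counter,
    PySem.Dict.values_eq_map_keys _ (PySem.Dict.nodup_keys_counter l) 0,
    PySem.Dict.keys_counter, List.any_map]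
  simp only [Function.comp_def, PySem.Dict.getD_counter]
  rw [Bool.eq_iff_iff]
  simp only [List.any_eq_true, PySem.Set.mem_ofList, decide_eq_true_eq]
  constructor
  · rintro ⟨x, hx, h⟩; exact ⟨x, hx, by exact_mod_cast h⟩
  · rintro ⟨x, hx, h⟩; exact ⟨x, hx, by exact_mod_cast h⟩

-- splitting a count-existence over the head of the list
lemma exists_count_cons_iff (P : Nat → Prop) (d : Char) (rest : List Char) :
    (∃ x ∈ d :: rest, P ((d :: rest).count x)) ↔
      (P ((d :: rest).count d) ∨ ∃ x ∈ rest, x ≠ d ∧ P (rest.count x)) := by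
  constructor
  · rintro ⟨x, hx, hP⟩
    by_cases hxd : x = d
    · subst hxd; exact Or.inl hP
    · refine Or.inr ⟨x, ?_, hxd, ?_⟩
      · rcases List.mem_cons.mp hx with h | h
        · exact absurd h hxd
        · exact h
      · rwa [List.count_cons_of_ne (Ne.symm hxd)] at hP
  · rintro (h | ⟨x, hx, hxd, hP⟩)
    · exact ⟨d, List.mem_cons_self, h⟩
    · exact ⟨x, List.mem_cons_of_mem _ hx, by rwa [List.count_cons_of_ne (Ne.symm hxd)]⟩

-- if the remaining suffix (with its previous digit) is not sorted, A's loop reports non-monotonic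
lemma checkLoop_break (t : List Char) : ∀ (p : Char) (occ : Int) (hd hep : Bool),
    ¬ List.IsChain (· ≤ ·) (p :: t) → (checkLoop t hd [p] occ hep).1 = false := by
  induction t with
  | nil => intro p occ hd hep h; exact absurd (List.isChain_singleton p) h
  | cons d rest ih =>
    intro p occ hd hep h
    rw [List.isChain_cons_cons] at h
    push_neg at h
    by_cases hlt : d < p
    · simp [checkLoop, pyStrLt_single, hlt]
    · have hrest : ¬ List.IsChain (· ≤ ·) (d :: rest) := h (le_of_not_gt hlt)
      by_cases heq : d = p
      · subst heq
        simp only [checkLoop, pyStrLt_single, decide_eq_true_eq, if_neg hlt]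
        exact ih d _ _ _ hrest
      · simp only [checkLoop, pyStrLt_single, decide_eq_true_eq, if_neg hlt,
          List.cons.injEq, and_true, if_neg heq]
        exact ih d _ _ _ hrest

lemma checkLoop_step_eq (d : Char) (rest : List Char) (hd hep : Bool) (occ : Int) :
    checkLoop (d :: rest) hd [d] occ hep = checkLoop rest true [d] (occ + 1) hep := by
  simp [checkLoop, pyStrLt_single]

lemma checkLoop_step_ne (d p : Char) (rest : List Char) (hd hep : Bool) (occ : Int)
    (h : ¬ d < p) (hne : d ≠ p) :
    checkLoop (d :: rest) hd [p] occ hep = checkLoop rest hd [d] 1 (if occ = 2 then true else hep) := by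
  simp [checkLoop, pyStrLt_single, h, hne]

-- the main invariant of A's loop on a sorted suffix: `p` is the previous digit, `occ ≥ 1` the
-- length of the current run, `hd` already reflects a finished run of length ≥ 2, and the final
-- has_double / has_exact_pair (after the post-loop `occ == 2` fix-up) are multiplicity facts
lemma checkLoop_sorted (l : List Char) : ∀ (p : Char) (occ : Int) (hd hep : Bool),
    List.IsChain (· ≤ ·) (p :: l) → 1 ≤ occ → (2 ≤ occ → hd = true) →
    ∃ occ' hep',
      checkLoop l hd [p] occ hep =
        (true,
         hd || decide (∃ x ∈ l, x ≠ p ∧ 2 ≤ l.count x) || decide (2 ≤ occ + (l.count p : Int)),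
         occ', hep') ∧
      ((if occ' = 2 then true else hep') =
        (hep || decide (∃ x ∈ l, x ≠ p ∧ l.count x = 2) || decide (occ + (l.count p : Int) = 2))) := by
  induction l with
  | nil =>
    intro p occ hd hep _ _ hhd
    refine ⟨occ, hep, ?_, ?_⟩
    · by_cases h2 : 2 ≤ occ
      · simp [checkLoop, h2, hhd h2]
      · simp [checkLoop, h2]
    · by_cases h2 : occ = 2 <;> simp [h2]
  | cons d rest ih =>
    intro p occ hd hep hch hocc hhd
    rw [List.isChain_cons_cons] at hch
    obtain ⟨hpd, hch⟩ := hch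
    by_cases hdp : d = p
    · subst hdp
      obtain ⟨occ', hep', h1, h2⟩ := ih d (occ + 1) true hep hch (by omega) (fun _ => rfl)
      refine ⟨occ', hep', ?_, ?_⟩
      · rw [checkLoop_step_eq, h1]
        simp
        exact Or.inr (by omega)
      · rw [h2]
        have e1 : (∃ x ∈ rest, x ≠ d ∧ rest.count x = 2) ↔
            (∃ x ∈ d :: rest, x ≠ d ∧ (d :: rest).count x = 2) := by
          constructor
          · rintro ⟨x, hx, hxd, hc⟩
            exact ⟨x, List.mem_cons_of_mem _ hx, hxd,
              by rwa [List.count_cons_of_ne (Ne.symm hxd)]⟩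
          · rintro ⟨x, hx, hxd, hc⟩
            rcases List.mem_cons.mp hx with h | h
            · exact absurd h hxd
            · exact ⟨x, h, hxd, by rwa [List.count_cons_of_ne (Ne.symm hxd)] at hc⟩
        have e2 : ((occ + 1) + (rest.count d : Int) = 2) ↔
            (occ + (((d :: rest).count d : Nat) : Int) = 2) := by
          rw [List.count_cons_self]; push_cast; omega
        rw [decide_eq_decide.mpr e1, decide_eq_decide.mpr e2]
    · have hplt : p < d := lt_of_le_of_ne hpd (fun h => hdp h.symm)
      obtain ⟨occ', hep', h1, h2⟩ :=
        ih d 1 hd (if occ = 2 then true else hep) hch (by omega) (by omega)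
      have hall : ∀ x ∈ d :: rest, p < x := by
        intro x hx
        rcases List.mem_cons.mp hx with h | h
        · exact h ▸ hplt
        · exact lt_of_lt_of_le hplt (List.rel_of_pairwise_cons hch.pairwise h)
      have hcnt0 : (d :: rest).count p = 0 :=
        List.count_eq_zero_of_not_mem (fun h => lt_irrefl p (hall p h))
      have eEx : ∀ P : Nat → Prop,
          ((∃ x ∈ d :: rest, x ≠ p ∧ P ((d :: rest).count x)) ↔
           (P ((d :: rest).count d) ∨ ∃ x ∈ rest, x ≠ d ∧ P (rest.count x))) := by
        intro P
        rw [show (∃ x ∈ d :: rest, x ≠ p ∧ P ((d :: rest).count x)) ↔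
              (∃ x ∈ d :: rest, P ((d :: rest).count x)) from
            ⟨fun ⟨x, hx, _, hP⟩ => ⟨x, hx, hP⟩,
             fun ⟨x, hx, hP⟩ => ⟨x, hx, ne_of_gt (hall x hx), hP⟩⟩]
        exact exists_count_cons_iff P d rest
      have ecnt : decide ((2:Int) ≤ occ + (((d :: rest).count p : Nat) : Int)) = decide (2 ≤ occ) := by
        rw [hcnt0]; push_cast; norm_num
      have ecnt2 : decide (occ + (((d :: rest).count p : Nat) : Int) = 2) = decide (occ = 2) := by
        rw [hcnt0]; push_cast; norm_num
      have ehead : decide ((2:Nat) ≤ (d :: rest).count d) = decide ((2:Int) ≤ 1 + (rest.count d : Int)) := by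
        rw [decide_eq_decide, List.count_cons_self]; push_cast; omega
      have ehead2 : decide ((d :: rest).count d = 2) = decide ((1:Int) + (rest.count d : Int) = 2) := by
        rw [decide_eq_decide, List.count_cons_self]; push_cast; omega
      refine ⟨occ', hep', ?_, ?_⟩
      · rw [checkLoop_step_ne d p rest hd hep occ (not_lt.mpr hpd) hdp, h1]
        have eDor : decide (∃ x ∈ d :: rest, x ≠ p ∧ 2 ≤ (d :: rest).count x)
            = (decide ((2:Nat) ≤ (d :: rest).count d) || decide (∃ x ∈ rest, x ≠ d ∧ 2 ≤ rest.count x)) := by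
          rw [← Bool.decide_or]
          exact decide_eq_decide.mpr (eEx (fun n => 2 ≤ n))
        rw [eDor, ecnt, ehead]
        simp only [Prod.mk.injEq, true_and, and_true]
        by_cases h2 : 2 ≤ occ
        · simp [hhd h2]
        · simp only [h2, decide_false, Bool.or_false]
          generalize decide (∃ x ∈ rest, x ≠ d ∧ 2 ≤ rest.count x) = A
          generalize decide ((2:Int) ≤ 1 + (rest.count d : Int)) = B
          cases hd <;> cases A <;> cases B <;> rfl
      · have hif : (if occ = 2 then true else hep) = (hep || decide (occ = 2)) := by
          by_cases hq : occ = 2 <;> simp [hq]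
        have eDor2 : decide (∃ x ∈ d :: rest, x ≠ p ∧ (d :: rest).count x = 2)
            = (decide ((d :: rest).count d = 2) || decide (∃ x ∈ rest, x ≠ d ∧ rest.count x = 2)) := by
          rw [← Bool.decide_or]
          exact decide_eq_decide.mpr (eEx (fun n => n = 2))
        rw [h2, hif, eDor2, ecnt2, ehead2]
        generalize decide (∃ x ∈ rest, x ≠ d ∧ rest.count x = 2) = A
        generalize decide ((1:Int) + (rest.count d : Int) = 2) = B
        generalize decide (occ = 2) = C
        cases hep <;> cases A <;> cases B <;> cases C <;> rfl

-- the first loop iteration against the sentinel "-1", when the first character is above '-'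
lemma checkLoop_first (c : Char) (t : List Char) (hc : ¬ c ≤ '-') :
    checkLoop (c :: t) false ['-', '1'] 1 false = checkLoop t false [c] 1 false := by
  simp only [checkLoop, pyStrLt_sentinel, hc, decide_false, Bool.false_eq_true, if_false,
    List.cons.injEq]
  norm_num

-- when the first character is at or below '-', A breaks immediately
lemma checkLoop_sentinel_break (c : Char) (t : List Char) (hc : c ≤ '-') :
    checkLoop (c :: t) false ['-', '1'] 1 false = (false, false, 1, false) := by
  simp [checkLoop, pyStrLt_sentinel, hc]

-- ===== VERDICT (by name: the statement is the Claim_ definition above) =====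
theorem check_spec : Claim_unchanged_check := by
  intro num_str part _ hnd
  show check num_str part = check_alt num_str part
  simp only [check, check_alt]
  rcases hl : num_str.toList with _ | ⟨c, t⟩
  · simp only [checkLoop]
    simp [PySem.Dict.empty, PySem.Dict.values]
  · by_cases hch : List.IsChain (· ≤ ·) (c :: t)
    · by_cases hc : c ≤ '-'
      · -- A breaks on the sentinel; ¬D_ forces B's pair scan to be false
        rw [checkLoop_sentinel_break c t hc]
        simp only [Bool.false_and]
        have hpair : ¬ (if part = "a" then ∃ x ∈ c :: t, 2 ≤ (c :: t).count x
            else ∃ x ∈ c :: t, (c :: t).count x = 2) := by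
          intro hp
          exact hnd ⟨by rw [hl]; simp, by rw [hl]; simpa using hc, by rw [hl]; exact hch,
            by rw [hl]; exact hp⟩
        by_cases hpa : part = "a"
        · rw [if_pos hpa] at hpair
          rw [zipAll_eq_isChain, decide_eq_true hch]
          simp only [if_pos hpa]
          rw [values_any_ge (c :: t), decide_eq_false hpair]
          simp
        · rw [if_neg hpa] at hpair
          rw [zipAll_eq_isChain, decide_eq_true hch]
          simp only [if_neg hpa]
          rw [values_any_eq (c :: t), decide_eq_false hpair]
          simp
      · -- sorted, first character above '-': both sides compute the multiplicity facts
        rw [checkLoop_first c t hc]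
        obtain ⟨occ', hep', h1, h2⟩ := checkLoop_sorted t c 1 false false hch (by omega) (by omega)
        rw [h1]
        rw [Bool.false_or] at h2
        dsimp only
        rw [Bool.true_and, Bool.false_or, zipAll_eq_isChain, decide_eq_true hch, Bool.true_and]
        have hexhd : (decide (∃ x ∈ t, x ≠ c ∧ 2 ≤ t.count x) || decide ((2:Int) ≤ 1 + (t.count c : Int)))
            = decide (∃ x ∈ c :: t, 2 ≤ (c :: t).count x) := by
          rw [← Bool.decide_or, decide_eq_decide]
          rw [exists_count_cons_iff (fun n => 2 ≤ n) c t, List.count_cons_self]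
          constructor
          · rintro (h | h)
            · exact Or.inr h
            · left; push_cast at h ⊢; omega
          · rintro (h | h)
            · right; push_cast at h ⊢; omega
            · exact Or.inl h
        have hexhep : (decide (∃ x ∈ t, x ≠ c ∧ t.count x = 2) || decide ((1:Int) + (t.count c : Int) = 2))
            = decide (∃ x ∈ c :: t, (c :: t).count x = 2) := by
          rw [← Bool.decide_or, decide_eq_decide]
          rw [exists_count_cons_iff (fun n => n = 2) c t, List.count_cons_self]
          constructor
          · rintro (h | h)
            · exact Or.inr h
            · left; push_cast at h ⊢; omega
          · rintro (h | h)
            · right; push_cast at h ⊢; omega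
            · exact Or.inl h
        by_cases hpa : part = "a"
        · rw [if_pos hpa, if_pos hpa, values_any_ge (c :: t), hexhd]
        · rw [if_neg hpa, if_neg hpa, h2, values_any_eq (c :: t), hexhep]
    · -- not sorted: A's loop breaks, B's monotonicity scan is false
      have hA : (checkLoop (c :: t) false ['-', '1'] 1 false).1 = false := by
        by_cases hc : c ≤ '-'
        · rw [checkLoop_sentinel_break c t hc]
        · rw [checkLoop_first c t hc]
          exact checkLoop_break t c 1 false false hch
      rw [hA, zipAll_eq_isChain, decide_eq_false hch]
      simp

theorem check_changed : Claim_changed_check := by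
  unfold Claim_changed_check
  refine ⟨by decide, ⟨by decide, by decide, by decide, ?_⟩, by decide, by decide, by decide⟩
  show (if ("a" : String) = "a" then ∃ x ∈ String.toList "--", 2 ≤ (String.toList "--").count x
        else ∃ x ∈ String.toList "--", (String.toList "--").count x = 2)
  rw [if_pos rfl]
  exact ⟨'-', by decide, by decide⟩

theorem check_tight : Claim_exact_check := by
  intro num_str part _ hD
  obtain ⟨hne, hhead, hch, hpair⟩ := hD
  rcases hl : num_str.toList with _ | ⟨c, t⟩
  · exact absurd hl hne
  · rw [hl] at hhead hch hpair
    simp only [List.headI_cons] at hhead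
    simp only [check, check_alt, hl]
    rw [checkLoop_sentinel_break c t hhead]
    simp only [Bool.false_and]
    rw [zipAll_eq_isChain, decide_eq_true hch]
    by_cases hpa : part = "a"
    · rw [if_pos hpa] at hpair
      simp only [if_pos hpa]
      rw [values_any_ge (c :: t), decide_eq_true hpair]
      simp
    · rw [if_neg hpa] at hpair
      simp only [if_neg hpa]
      rw [values_any_eq (c :: t), decide_eq_true hpair]
      simp
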